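-- pv_equiv track=rewrite | github.com/AlexSvistunov/AlexeySvistunov1 | задание 10/10.2.py | sort_by_line
-- ===== SOURCE A (Python) =====
-- def sort_by_line(matrix, k):
--     m = [(i, el) for i, el in enumerate(matrix[k].copy())]
--     m.sort(key=lambda e: e[1])
--     w = len(matrix[0])
--     h = len(matrix)
--     new_matrix = []
--     for i in range(h):
--         new_matrix.append([])
--         for j in range(w):
--             new_matrix[i].append(matrix[i][m[j][0]])
--     return new_matrix
-- ===== SOURCE B (Python) =====
-- def sort_by_line(matrix, k):
--     cols = sorted(zip(*matrix), key=lambda c: c[k])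
--     return [[col[i] for col in cols] for i in range(len(matrix))]
-- ===== Notes on version B (the rewrite author's own statement) =====
-- stated objective: idiomatic
-- what changed: B transposes the matrix into its columns with zip(*matrix), stably sorts the whole columns by their k-th entry, and rebuilds the rows, instead of building an index permutation from a sorted enumerated copy of row k and reindexing every cell through it.
-- outside the precondition, e.g. on sort_by_line([[5, 6], [9, 9, 9]], 1): A returns [[5, 6], [9, 9]], B returns [[5, 6], [9, 9]]; on sort_by_line([[1, 2], [0, 3, 9]], 1): A returns [[1, 2], [0, 3]], B returns [[1, 2], [0, 3]]
import Mathlib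
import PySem

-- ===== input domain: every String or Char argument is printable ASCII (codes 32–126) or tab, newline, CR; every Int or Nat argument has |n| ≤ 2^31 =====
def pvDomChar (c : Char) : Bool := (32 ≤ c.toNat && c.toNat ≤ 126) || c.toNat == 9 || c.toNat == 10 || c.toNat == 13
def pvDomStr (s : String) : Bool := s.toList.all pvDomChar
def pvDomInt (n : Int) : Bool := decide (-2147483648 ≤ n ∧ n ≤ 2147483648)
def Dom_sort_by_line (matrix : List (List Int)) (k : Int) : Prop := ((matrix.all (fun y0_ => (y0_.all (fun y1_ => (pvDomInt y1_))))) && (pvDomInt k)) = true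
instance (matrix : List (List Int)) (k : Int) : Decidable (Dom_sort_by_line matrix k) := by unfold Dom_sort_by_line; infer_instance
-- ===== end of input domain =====

-- B replaces A's index-permutation-and-reindex scheme by transpose / sort-whole-columns / rebuild rows; same cost, more idiomatic.


-- ===== PORT A =====
def sort_by_line (matrix : List (List Int)) (k : Int) : List (List Int) :=
  -- matrix[k] (pyGet? = none is the IndexError, excluded by Pre_)
  let row := (PySem.List.pyGet? matrix k).getD []
  let m := PySem.List.sorted (PySem.List.enumerate row) (fun e => e.2)
  let w := PySem.List.len ((PySem.List.pyGet? matrix 0).getD [])   -- len(matrix[0])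
  let h := PySem.List.len matrix
  (PySem.List.pyRange 0 h).foldl (fun nm i =>
    nm ++ [(PySem.List.pyRange 0 w).foldl (fun r j =>
      -- matrix[i][m[j][0]]; the getD defaults are never used inside Pre_
      r ++ [PySem.List.pyGetD (PySem.List.pyGetD matrix i [])
              (PySem.List.pyGetD m j (0, 0)).1 0]) []]) []

-- ===== PORT B =====
-- zip(*rows): truncates to the shortest row; zip of an empty argument list is empty (exact)
def pyZip (rows : List (List Int)) : List (List Int) :=
  if _hc : rows ≠ [] ∧ rows.all (fun r => !r.isEmpty) then
    rows.map (fun r => r.headI) :: pyZip (rows.map (fun r => r.tail))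
  else []
termination_by rows.headI.length
decreasing_by
  obtain ⟨hne, hall⟩ := _hc
  match rows, hne with
  | r0 :: rs, _ =>
    simp only [List.all_cons, Bool.and_eq_true, Bool.not_eq_true', List.isEmpty_eq_false_iff] at hall
    simp only [List.attach_cons, List.map_cons, List.map_map, List.headI_cons, List.length_tail]
    have : r0.length ≠ 0 := fun h0 => hall.1 (List.eq_nil_of_length_eq_zero h0)
    omega

def sort_by_line_alt (matrix : List (List Int)) (k : Int) : List (List Int) :=
  -- key c[k]: exact for every row index k admitted by Pre_ (possibly negative)
  let cols := PySem.List.sorted (pyZip matrix) (fun c => PySem.List.pyGetD c k 0)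
  (PySem.List.pyRange 0 (PySem.List.len matrix)).map (fun i =>
    cols.map (fun col => PySem.List.pyGetD col i 0))

-- ===== PRECONDITION & SPEC =====
-- Pre_ admits a nonempty matrix with a valid (possibly negative) row index k whose first row is empty, or whose
-- rows are all at least as long as row 0 with row k exactly that long: outside this A raises IndexError (empty
-- matrix, out-of-range k, a row too short for the sorted index permutation), except on ragged matrices where
-- row k is longer than row 0 yet the permutation happens to stay in range — there A's len(matrix[0])-truncated
-- reindexing versus zip's truncation-to-the-shortest-row makes agreement accidental (see the cited example).
def Pre_sort_by_line (matrix : List (List Int)) (k : Int) : Prop :=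
  matrix ≠ [] ∧ -(matrix.length : Int) ≤ k ∧ k < (matrix.length : Int) ∧
    (matrix.headI = [] ∨
      ((∀ r ∈ matrix, matrix.headI.length ≤ r.length) ∧
       (matrix.getD (if k < 0 then (k + (matrix.length : Int)).toNat else k.toNat) []).length
         = matrix.headI.length))
instance (matrix : List (List Int)) (k : Int) : Decidable (Pre_sort_by_line matrix k) := by
  unfold Pre_sort_by_line; infer_instance
def pvWitness_sort_by_line : List (List Int) × Int := ([[3, 1, 2], [4, 5, 6]], 0)

def Spec_sort_by_line (matrix : List (List Int)) (k : Int) (out : List (List Int)) : Prop := out = sort_by_line_alt matrix k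
instance (matrix : List (List Int)) (k : Int) (out : List (List Int)) : Decidable (Spec_sort_by_line matrix k out) := by unfold Spec_sort_by_line; infer_instance

-- ===== CLAIM (what is proved, stated in full; the proofs are below) =====
def Claim_equal_sort_by_line : Prop := ∀ (matrix : List (List Int)) (k : Int), Dom_sort_by_line matrix k → Pre_sort_by_line matrix k → Spec_sort_by_line matrix k (sort_by_line matrix k)

-- ===== LEMMAS AND PROOFS =====

-- Python's wrap-around indexing, under valid bounds
theorem pyGetD_wrap {α : Type} (xs : List α) (k : Int) (d : α)
    (h1 : -(xs.length : Int) ≤ k) (h2 : k < (xs.length : Int)) :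
    PySem.List.pyGetD xs k d = xs.getD (if k < 0 then (k + xs.length).toNat else k.toNat) d := by
  simp only [PySem.List.pyGetD, PySem.List.pyGet?, PySem.List.pyIdx?]
  by_cases hk : 0 ≤ k
  · rw [if_pos hk, if_pos h2, if_neg (by omega)]
    simp [List.getD, List.getElem?_eq_getElem (by omega : k.toNat < xs.length)]
  · rw [if_neg hk, if_pos h1, if_pos (by omega)]
    have he : xs.length - (-k).toNat = (k + xs.length).toNat := by omega
    rw [he]
    simp [List.getD, List.getElem?_eq_getElem (by omega : (k + xs.length).toNat < xs.length)]

-- PySem.List.insertBy commutes with List.map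
theorem insertBy_map {α β κ : Type} [LT κ] [DecidableLT κ] (key : β → κ) (f : α → β) (x : α) (ys : List α) :
    PySem.List.insertBy (fun a b => decide (key a < key b)) (f x) (ys.map f)
      = (PySem.List.insertBy (fun a b => decide (key (f a) < key (f b))) x ys).map f := by
  induction ys with
  | nil => rfl
  | cons y ys ih =>
    simp only [List.map_cons, PySem.List.insertBy]
    by_cases hb : key (f x) < key (f y)
    · simp [hb]
    · simp [hb, ih]

-- sorting a mapped list = mapping the list sorted by the composed key
theorem sorted_map {α β κ : Type} [LT κ] [DecidableLT κ] (l : List α) (f : α → β) (key : β → κ) :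
    PySem.List.sorted (l.map f) key = (PySem.List.sorted l (fun x => key (f x))).map f := by
  rw [PySem.List.sorted_eq_foldl_insertBy, PySem.List.sorted_eq_foldl_insertBy, List.foldl_map]
  suffices h : ∀ (acc : List α),
      l.foldl (fun acc x => PySem.List.insertBy (fun a b => decide (key a < key b)) (f x) acc) (acc.map f)
        = (l.foldl (fun acc x => PySem.List.insertBy (fun a b => decide (key (f a) < key (f b))) x acc) acc).map f by
    simpa using h []
  induction l with
  | nil => intro acc; rfl
  | cons x xs ih =>
    intro acc
    simp only [List.foldl_cons]
    rw [insertBy_map key f, ih]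

theorem getD_map {α β : Type} (l : List α) (f : α → β) (j : Nat) (d : β) (hj : j < l.length) :
    (l.map f).getD j d = f (l[j]) := by
  rw [List.getD_eq_getElem _ _ (by simpa using hj)]
  simp

theorem map_getD_range {α : Type} (l : List α) (d : α) :
    (List.range l.length).map (fun j => l.getD j d) = l := by
  apply List.ext_getElem (by simp)
  intro i h1 h2
  simp [List.getElem?_eq_getElem h2]

theorem tail_getD {α : Type} (r : List α) (j : Nat) (d : α) : r.tail.getD j d = r.getD (j+1) d := by
  cases r <;> simp [List.getD]

-- zip(*matrix) of a nonempty rectangular matrix is its list of columns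
theorem pyZip_rect (w : Nat) (matrix : List (List Int)) (hne : matrix ≠ [])
    (hhead : matrix.headI.length = w)
    (hmin : ∀ r ∈ matrix, w ≤ r.length) :
    pyZip matrix = (List.range w).map (fun j => matrix.map (fun r => r.getD j 0)) := by
  induction w generalizing matrix with
  | zero =>
    rw [pyZip, dif_neg, List.range_zero, List.map_nil]
    rintro ⟨-, hall⟩
    match matrix, hne with
    | r :: rs, _ =>
      simp only [List.all_cons, Bool.and_eq_true, Bool.not_eq_true', List.isEmpty_eq_false_iff] at hall
      exact hall.1 (List.eq_nil_of_length_eq_zero (by simpa using hhead))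
  | succ w ih =>
    rw [pyZip, dif_pos ⟨hne, by
      simp only [List.all_eq_true, Bool.not_eq_true', List.isEmpty_eq_false_iff]
      intro r hr h0
      have := hmin r hr; simp [h0] at this⟩]
    rw [ih (matrix.map (fun r => r.tail)) (by simpa using hne)
        (by match matrix, hne with
            | r :: rs, _ =>
              simp only [List.map_cons, List.headI_cons, List.length_tail]
              simp only [List.headI_cons] at hhead
              omega)
        (by intro r hr
            obtain ⟨s, hs, rfl⟩ := List.mem_map.mp hr
            have := hmin s hs
            simp only [List.length_tail]
            omega)]
    rw [List.range_succ_eq_map, List.map_cons, List.map_map]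
    congr 1
    · exact List.map_congr_left (fun r hr => by
        have := hmin r hr
        cases r with
        | nil => simp at this
        | cons a t => simp [List.getD])
    · apply List.map_congr_left
      intro j hj
      simp only [Function.comp, List.map_map]
      exact List.map_congr_left (fun r hr => tail_getD r j 0)

-- zip(*matrix) is empty as soon as the first row is
theorem pyZip_headI_nil (matrix : List (List Int)) (h0 : matrix.headI = []) : pyZip matrix = [] := by
  rw [pyZip, dif_neg]
  rintro ⟨hne, hall⟩
  match matrix, hne with
  | r :: rs, _ =>
    simp only [List.headI_cons] at h0
    simp only [List.all_cons, Bool.and_eq_true, Bool.not_eq_true', List.isEmpty_eq_false_iff] at hall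
    exact hall.1 h0

theorem pyGet?_zero_headI {α : Type} [Inhabited α] (l : List α) (hne : l ≠ []) :
    PySem.List.pyGet? l 0 = some l.headI := by
  cases l with
  | nil => exact absurd rfl hne
  | cons a t => simp [PySem.List.pyGet?, PySem.List.pyIdx?]

-- the width-0 degenerate case: both programs return one empty row per row of the matrix
theorem sort_by_line_eq_alt_zero (matrix : List (List Int)) (k : Int)
    (hne : matrix ≠ []) (h0 : matrix.headI = []) :
    sort_by_line matrix k = sort_by_line_alt matrix k := by
  simp only [sort_by_line, sort_by_line_alt]
  rw [pyGet?_zero_headI matrix hne, pyZip_headI_nil matrix h0]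
  simp [h0, PySem.List.sorted, PySem.List.pyRange_one_eq_nil (le_refl (0 : Int))]

theorem sort_by_line_eq_alt (matrix : List (List Int)) (k : Int)
    (hne : matrix ≠ [])
    (hk1 : -(matrix.length : Int) ≤ k) (hk2 : k < (matrix.length : Int))
    (hmin : ∀ r ∈ matrix, matrix.headI.length ≤ r.length)
    (hrowlen0 : (matrix.getD (if k < 0 then (k + (matrix.length : Int)).toNat else k.toNat) []).length
        = matrix.headI.length) :
    sort_by_line matrix k = sort_by_line_alt matrix k := by
  have hpos : 0 < matrix.length := List.length_pos_of_ne_nil hne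
  set h := matrix.length with hh
  set w := matrix.headI.length with hw
  set kk : Nat := if k < 0 then (k + h).toNat else k.toNat with hkk
  have hkkh : kk < h := by rw [hkk]; split_ifs <;> omega
  set row := matrix.getD kk [] with hrowdef
  have hrow_elem : row = matrix[kk] := List.getD_eq_getElem matrix [] hkkh
  have hrowlen : row.length = w := hrowlen0
  set S := PySem.List.sorted (List.range w) (fun j => row.getD j 0) with hS
  have hSlen : S.length = w := by rw [hS, PySem.List.length_sorted, List.length_range]
  set col : Nat → List Int := fun j => matrix.map (fun r => r.getD j 0) with hcol
  -- A-side row lookup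
  have hA_row : (PySem.List.pyGet? matrix k).getD [] = row := by
    have := pyGetD_wrap matrix k [] hk1 hk2
    simpa [PySem.List.pyGetD, ← hh, ← hkk, ← hrowdef] using this
  -- A-side m
  have hm : PySem.List.sorted (PySem.List.enumerate row) (fun e : Int × Int => e.2)
      = S.map (fun j : Nat => ((j : Int), row.getD j 0)) := by
    rw [PySem.List.enumerate_eq_map_pyRange row 0]
    have hlen : PySem.List.len row = ((w : Nat) : Int) := by
      simp [PySem.List.len, hrowlen]
    rw [hlen, PySem.List.pyRange_zero_natCast, List.map_map]
    have hfn : ((fun j : Int => (j, PySem.List.pyGetD row j 0)) ∘ fun (kn : Nat) => (kn : Int))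
        = fun j : Nat => ((j : Int), row.getD j 0) := by
      funext j; simp [Function.comp, PySem.List.pyGetD_natCast]
    rw [hfn, sorted_map]
  -- A-side w
  have hA_w : PySem.List.len ((PySem.List.pyGet? matrix 0).getD []) = ((w : Nat) : Int) := by
    rw [pyGet?_zero_headI matrix hne]
    simp [hw]
  -- canonical A
  have hA : sort_by_line matrix k = (List.range h).map (fun i =>
      (List.range w).map (fun j => (matrix.getD i []).getD (S.getD j 0) 0)) := by
    simp only [sort_by_line]
    rw [hA_row, hm, hA_w]
    rw [show PySem.List.len matrix = ((h : Nat) : Int) from by simp [PySem.List.len, hh]]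
    rw [PySem.List.pyRange_zero_natCast, PySem.List.pyRange_zero_natCast]
    simp only [PySem.List.foldl_append_singleton_eq_map, List.nil_append, List.map_map]
    apply List.map_congr_left
    intro i hi
    simp only [Function.comp, PySem.List.pyGetD_natCast]
    apply List.map_congr_left
    intro j hj
    have hjw : j < w := List.mem_range.mp hj
    simp only [Function.comp, PySem.List.pyGetD_natCast]
    rw [getD_map S _ j _ (by omega)]
    simp only [PySem.List.pyGetD_natCast]
    congr 1
    exact (List.getD_eq_getElem S 0 (by omega)).symm
  -- B-side key
  have hkey : ∀ j : Nat, PySem.List.pyGetD (col j) k 0 = row.getD j 0 := by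
    intro j
    have hcl : (col j).length = h := by simp [hcol, hh]
    have := pyGetD_wrap (col j) k 0 (by rw [hcl]; exact hk1) (by rw [hcl]; exact hk2)
    rw [this, hcl, ← hkk]
    rw [hcol]
    rw [getD_map matrix _ kk _ hkkh, ← hrow_elem]
  have hsortedB : PySem.List.sorted (pyZip matrix) (fun c => PySem.List.pyGetD c k 0)
      = S.map col := by
    rw [pyZip_rect w matrix hne hw.symm hmin, sorted_map]
    have hfun : (fun x : Nat => PySem.List.pyGetD (List.map (fun r => r.getD x 0) matrix) k 0)
        = (fun j : Nat => row.getD j 0) := funext (fun j => hkey j)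
    rw [hfun, ← hS]
  -- canonical B
  have hB : sort_by_line_alt matrix k = (List.range h).map (fun i =>
      S.map (fun s => (matrix.getD i []).getD s 0)) := by
    simp only [sort_by_line_alt]
    rw [hsortedB]
    rw [show PySem.List.len matrix = ((h : Nat) : Int) from by simp [PySem.List.len, hh]]
    rw [PySem.List.pyRange_zero_natCast, List.map_map]
    apply List.map_congr_left
    intro i hi
    have hih : i < h := List.mem_range.mp hi
    simp only [Function.comp, List.map_map]
    apply List.map_congr_left
    intro s hs
    simp only [Function.comp, PySem.List.pyGetD_natCast, hcol]
    rw [getD_map matrix _ i _ hih, List.getD_eq_getElem matrix [] hih]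
  rw [hA, hB]
  apply List.map_congr_left
  intro i hi
  have : (List.range w).map (fun j => S.getD j 0) = S := by
    have := map_getD_range S 0
    rw [hSlen] at this
    exact this
  conv_rhs => rw [← this, List.map_map]
  rfl

-- ===== VERDICT (by name: the statement is the Claim_ definition above) =====
theorem sort_by_line_spec : Claim_equal_sort_by_line := by
  intro matrix k _ hpre
  obtain ⟨hne, hk1, hk2, hcase⟩ := hpre
  rcases hcase with h0 | ⟨hmin, hrl⟩
  · exact sort_by_line_eq_alt_zero matrix k hne h0
  · exact sort_by_line_eq_alt matrix k hne hk1 hk2 hmin hrl
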